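-- pv_equiv track=rewrite | github.com/mcjamil/cribbage_hand_scorer | cribbage_hand_scorer.py | score_sequence
-- ===== SOURCE A (Python) =====
-- SINGLE_CARD_SCORE = 1
--
-- MIN_SEQUENCE_SIZE = 3
--
-- def score_sequence(cards):
--   """
--   Score a sequence (if present)
--
--   :param cards: tuple of card tuples (e.g., ((5, 'h'), (3, 'c')) )
--   :type cards: tuple(tuple(int, str), ...)
--   :returns: sequence score
--   :rtype: int
--   """
--   sequence_score = 0
--   # Check to see that at least MIN_SEQUENCE_SIZE cards are present;
--   # if not, return immediately
--   if len(cards) < MIN_SEQUENCE_SIZE: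
--     return sequence_score
--   # Use list comprehension to make a list of the first element
--   # for each card (that's the card number)
--   card_numbers = [card[0] for card in cards]
--   # Sort the list before checking the sequence is valid
--   card_numbers.sort()
--   # Use set comprehension to make a set of the integer difference
--   # between successive elements
--   # If it's a sequence, all the set differences will be 1, so the
--   # set will contain only one element with the value 1
--   card_number_differences = {card_numbers[i + 1] - card_numbers[i]
--                              for i in range(len(card_numbers) - 1)}
--   if len(card_number_differences) == 1 and \
--     next(iter(card_number_differences)) == 1:
--     sequence_score += len(cards) * SINGLE_CARD_SCORE
--   return sequence_score
-- ===== SOURCE B (Python) =====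
-- SINGLE_CARD_SCORE = 1
--
-- MIN_SEQUENCE_SIZE = 3
--
-- def score_sequence(cards):
--   """Score a consecutive run: distinct numbers spanning exactly len(cards)-1."""
--   if len(cards) < MIN_SEQUENCE_SIZE:
--     return 0
--   card_numbers = [card[0] for card in cards]
--   if len(set(card_numbers)) == len(card_numbers) and \
--      max(card_numbers) - min(card_numbers) == len(card_numbers) - 1:
--     return len(card_numbers) * SINGLE_CARD_SCORE
--   return 0
-- ===== Notes on version B (the rewrite author's own statement) =====
-- stated objective: simpler
-- what changed: Replaces sort + adjacent-difference set with a direct distinctness-and-span test (len(set)==len and max-min==len-1), removing the sort and the difference loop.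
import Mathlib
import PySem

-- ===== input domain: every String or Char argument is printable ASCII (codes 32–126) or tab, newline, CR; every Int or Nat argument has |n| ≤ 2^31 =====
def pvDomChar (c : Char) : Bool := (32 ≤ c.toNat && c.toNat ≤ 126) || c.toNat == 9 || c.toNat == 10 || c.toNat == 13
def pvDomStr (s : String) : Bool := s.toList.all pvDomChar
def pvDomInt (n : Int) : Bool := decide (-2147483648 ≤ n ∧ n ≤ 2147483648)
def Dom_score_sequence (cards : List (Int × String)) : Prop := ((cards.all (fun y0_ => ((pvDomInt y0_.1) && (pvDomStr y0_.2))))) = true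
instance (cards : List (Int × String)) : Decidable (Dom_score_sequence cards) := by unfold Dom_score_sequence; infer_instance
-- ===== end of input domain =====

-- B replaces A's sort + adjacent-difference set by a direct distinctness-and-span test (simpler; return value only, no mutation is observable).

-- ===== PORT A =====
def score_sequence (cards : List (Int × String)) : Int :=
  let sequence_score : Int := 0
  if PySem.List.len cards < 3 then sequence_score
  else
    let card_numbers := cards.map (fun card => card.1)
    let card_numbers := PySem.List.sorted card_numbers (fun x => x) false
    let card_number_differences : PySem.Set Int :=
      PySem.Set.ofList
        ((PySem.List.pyRange 0 (PySem.List.len card_numbers - 1) 1).map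
          (fun i => PySem.List.pyGetD card_numbers (i + 1) 0 -
                    PySem.List.pyGetD card_numbers i 0))
    -- 'next(iter(s))' is read only after 'len(s) == 1', where it is the set's unique element
    if card_number_differences.length = 1 ∧ card_number_differences.getD 0 0 = 1 then
      sequence_score + PySem.List.len cards * 1
    else sequence_score

-- ===== PORT B =====
def score_sequence_alt (cards : List (Int × String)) : Int :=
  if PySem.List.len cards < 3 then 0
  else
    let card_numbers := cards.map (fun card => card.1)
    -- max()/min() on a nonempty list (guard ensures ≥ 3 elements)
    let mx := (PySem.List.max? card_numbers (fun x => x)).getD 0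
    let mn := (PySem.List.min? card_numbers (fun x => x)).getD 0
    if (PySem.Set.ofList card_numbers).length = card_numbers.length ∧
       mx - mn = PySem.List.len card_numbers - 1 then
      PySem.List.len card_numbers * 1
    else 0

-- ===== PRECONDITION & SPEC =====
def Spec_score_sequence (cards : List (Int × String)) (out : Int) : Prop := out = score_sequence_alt cards
instance (cards : List (Int × String)) (out : Int) : Decidable (Spec_score_sequence cards out) := by unfold Spec_score_sequence; infer_instance

-- ===== CLAIM (what is proved, stated in full; the proofs are below) =====
def Claim_equal_score_sequence : Prop := ∀ (cards : List (Int × String)), Dom_score_sequence cards → Spec_score_sequence cards (score_sequence cards)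

-- ===== LEMMAS AND PROOFS =====

-- set(xs) keeps the length of xs exactly when xs has no duplicates
theorem pv_len_ofList_eq_iff_nodup (xs : List Int) :
    (PySem.Set.ofList xs).length = xs.length ↔ xs.Nodup := by
  constructor
  · induction xs with
    | nil => simp
    | cons x t ih =>
      intro h
      rw [PySem.Set.ofList_cons] at h
      simp only [List.length_cons, Nat.add_left_inj] at h ⊢
      have hle1 : ((PySem.Set.ofList t).length ≤ t.length) := PySem.Set.length_ofList_le t
      have hdis : PySem.Set.discard (PySem.Set.ofList t) x
          = (PySem.Set.ofList t).filter (fun y => !(y == x)) := by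
        simp [PySem.Set.discard]
      have hle2 : (PySem.Set.discard (PySem.Set.ofList t) x).length ≤ (PySem.Set.ofList t).length := by
        rw [hdis]; exact List.length_filter_le _ _
      have heq : (PySem.Set.ofList t).length = t.length := by omega
      have hnd := ih heq
      refine List.nodup_cons.mpr ⟨?_, hnd⟩
      intro hx
      have hxs : x ∈ PySem.Set.ofList t := (PySem.Set.mem_ofList t x).mpr hx
      have : (PySem.Set.discard (PySem.Set.ofList t) x).length < (PySem.Set.ofList t).length := by
        rw [hdis]
        refine List.length_filter_lt_length_iff_exists.mpr ⟨x, hxs, by simp⟩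
      omega
  · intro h; rw [PySem.Set.ofList_eq_self_of_nodup xs h]

-- a one-element set of Int: length 1 with head a ↔ xs nonempty with every element a
theorem pv_ofList_singleton_iff (xs : List Int) (a : Int) (hne : xs ≠ []) :
    ((PySem.Set.ofList xs).length = 1 ∧ (PySem.Set.ofList xs).getD 0 0 = a) ↔
      (∀ x ∈ xs, x = a) := by
  constructor
  · rintro ⟨h1, h2⟩ x hx
    obtain ⟨b, hb⟩ := List.length_eq_one_iff.mp h1
    have hxb : x ∈ PySem.Set.ofList xs := (PySem.Set.mem_ofList xs x).mpr hx
    rw [hb] at hxb h2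
    simp at hxb h2
    omega
  · intro hall
    obtain ⟨d, t, rfl⟩ := List.exists_cons_of_ne_nil hne
    have hd : d = a := hall d (by simp)
    have hofl : PySem.Set.ofList (d :: t) = [d] := by
      rw [PySem.Set.ofList_cons]
      have : PySem.Set.discard (PySem.Set.ofList t) d = [] := by
        rw [List.eq_nil_iff_forall_not_mem]
        intro y hy
        have hmem : y ∈ PySem.Set.ofList t ∧ y ≠ d :=
          (PySem.Set.mem_discard (PySem.Set.ofList t) d y).mp hy
        have : y = a := hall y (by simp [(PySem.Set.mem_ofList t y).mp hmem.1])
        exact hmem.2 (by omega)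
      rw [this]
    rw [hofl]; simp [hd]

-- strictly increasing Int list: indices i ≤ j give a gap of at least j - i
theorem pv_mono_gap (ss : List Int) (h : ss.Pairwise (· < ·)) :
    ∀ i j : Nat, i ≤ j → j < ss.length →
      ss.getD i 0 + ((j : Int) - (i : Int)) ≤ ss.getD j 0 := by
  intro i j hij hj
  induction j with
  | zero =>
    have : i = 0 := by omega
    subst this; simp
  | succ m ih =>
    by_cases hi : i = m + 1
    · subst hi; simp
    · have him : i ≤ m := by omega
      have hm : m < ss.length := by omega
      have hstep : ss.getD m 0 < ss.getD (m+1) 0 := by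
        rw [List.getD_eq_getElem ss 0 hm, List.getD_eq_getElem ss 0 hj]
        exact List.pairwise_iff_getElem.mp h m (m+1) hm hj (by omega)
      have := ih him hm
      push_cast
      omega

-- nondecreasing list: ss[i] ≤ ss[j] for i ≤ j
theorem pv_mono_le (ss : List Int) (h : ss.Pairwise (· ≤ ·)) :
    ∀ i j : Nat, i ≤ j → j < ss.length → ss.getD i 0 ≤ ss.getD j 0 := by
  intro i j hij hj
  rcases Nat.lt_or_ge i j with hlt | hge
  · rw [List.getD_eq_getElem ss 0 (by omega), List.getD_eq_getElem ss 0 hj]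
    exact List.pairwise_iff_getElem.mp h i j (by omega) hj hlt
  · have : i = j := by omega
    subst this; rfl

-- all adjacent steps 1 ⇒ closed form ss[k] = ss[0] + k
theorem pv_steps_closed (ss : List Int)
    (hP : ∀ k : Nat, k + 1 < ss.length → ss.getD (k+1) 0 = ss.getD k 0 + 1) :
    ∀ k : Nat, k < ss.length → ss.getD k 0 = ss.getD 0 0 + (k : Int) := by
  intro k
  induction k with
  | zero => simp
  | succ m ih =>
    intro hk
    have h1 := hP m hk
    have h2 := ih (by omega)
    push_cast
    omega

theorem pv_main (ns : List Int) (h3 : 3 ≤ ns.length) :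
    ((PySem.Set.ofList ((PySem.List.pyRange 0 (PySem.List.len (PySem.List.sorted ns (fun x => x) false) - 1) 1).map
        (fun i => PySem.List.pyGetD (PySem.List.sorted ns (fun x => x) false) (i + 1) 0 -
                  PySem.List.pyGetD (PySem.List.sorted ns (fun x => x) false) i 0))).length = 1 ∧
     (PySem.Set.ofList ((PySem.List.pyRange 0 (PySem.List.len (PySem.List.sorted ns (fun x => x) false) - 1) 1).map
        (fun i => PySem.List.pyGetD (PySem.List.sorted ns (fun x => x) false) (i + 1) 0 -
                  PySem.List.pyGetD (PySem.List.sorted ns (fun x => x) false) i 0))).getD 0 0 = 1)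
    ↔ ((PySem.Set.ofList ns).length = ns.length ∧
       (PySem.List.max? ns (fun x => x)).getD 0 - (PySem.List.min? ns (fun x => x)).getD 0
         = PySem.List.len ns - 1) := by
  set ss := PySem.List.sorted ns (fun x => x) false with hss
  have hperm : ss.Perm ns := PySem.List.sorted_perm ns (fun x => x) false
  have hpair : ss.Pairwise (· ≤ ·) := PySem.List.sorted_pairwise ns (fun x => x)
  have hlen : ss.length = ns.length := hperm.length_eq
  have hne : ns ≠ [] := by intro h; subst h; simp at h3
  have hssne : ss ≠ [] := by intro h; rw [h] at hlen; simp at hlen; omega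
  -- the difference list in Nat-index form
  have hD : ((PySem.List.pyRange 0 (PySem.List.len ss - 1) 1).map
        (fun i => PySem.List.pyGetD ss (i + 1) 0 - PySem.List.pyGetD ss i 0))
      = (List.range (ss.length - 1)).map (fun k => ss.getD (k+1) 0 - ss.getD k 0) := by
    rw [PySem.List.pyRange_one, List.map_map]
    have htn : ((PySem.List.len ss - 1) - 0).toNat = ss.length - 1 := by
      simp only [PySem.List.len_eq]; omega
    rw [htn]
    apply List.map_congr_left
    intro k hk
    simp only [Function.comp]
    rw [show (0:Int) + (k:Int) = ((k:Nat):Int) by ring,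
        show ((k:Nat):Int) + 1 = ((k+1:Nat):Int) by push_cast; ring,
        PySem.List.pyGetD_natCast, PySem.List.pyGetD_natCast]
  rw [hD]
  -- LHS ↔ all adjacent steps are 1
  have hDne : (List.range (ss.length - 1)).map (fun k => ss.getD (k+1) 0 - ss.getD k 0) ≠ [] := by
    simp; omega
  rw [pv_ofList_singleton_iff _ 1 hDne]
  have hstepiff : (∀ x ∈ (List.range (ss.length - 1)).map (fun k => ss.getD (k+1) 0 - ss.getD k 0), x = 1)
      ↔ (∀ k : Nat, k + 1 < ss.length → ss.getD (k+1) 0 = ss.getD k 0 + 1) := by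
    simp only [List.mem_map, List.mem_range]
    constructor
    · intro h k hk
      have := h _ ⟨k, by omega, rfl⟩
      omega
    · rintro h x ⟨k, hk, rfl⟩
      have := h k (by omega)
      omega
  rw [hstepiff]
  -- identify max/min with the ends of the sorted list
  obtain ⟨mx, hmx⟩ : ∃ m, PySem.List.max? ns (fun x => x) = some m := by
    cases h : PySem.List.max? ns (fun x => x) with
    | none => exact absurd ((PySem.List.max?_eq_none_iff ns (fun x => x)).mp h) hne
    | some m => exact ⟨m, rfl⟩
  obtain ⟨mn, hmn⟩ : ∃ m, PySem.List.min? ns (fun x => x) = some m := by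
    cases h : PySem.List.min? ns (fun x => x) with
    | none => exact absurd ((PySem.List.min?_eq_none_iff ns (fun x => x)).mp h) hne
    | some m => exact ⟨m, rfl⟩
  have hmxmem : mx ∈ ns := PySem.List.max?_mem hmx
  have hmxmax : ∀ y ∈ ns, y ≤ mx := PySem.List.max?_isMax hmx
  have hmnmem : mn ∈ ns := PySem.List.min?_mem hmn
  have hmnmin : ∀ y ∈ ns, mn ≤ y := PySem.List.min?_isMin hmn
  have hlast_mem : ss.getD (ss.length - 1) 0 ∈ ns := by
    rw [← hperm.mem_iff, List.getD_eq_getElem ss 0 (by omega)]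
    exact List.getElem_mem _
  have hhead_mem : ss.getD 0 0 ∈ ns := by
    rw [← hperm.mem_iff, List.getD_eq_getElem ss 0 (by omega)]
    exact List.getElem_mem _
  have hmx_eq : mx = ss.getD (ss.length - 1) 0 := by
    have h1 : ss.getD (ss.length - 1) 0 ≤ mx := hmxmax _ hlast_mem
    obtain ⟨k, hk, hkx⟩ := List.mem_iff_getElem.mp (hperm.mem_iff.mpr hmxmem)
    have h2 : mx ≤ ss.getD (ss.length - 1) 0 := by
      rw [← hkx, ← List.getD_eq_getElem ss 0 hk]
      exact pv_mono_le ss hpair k (ss.length - 1) (by omega) (by omega)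
    omega
  have hmn_eq : mn = ss.getD 0 0 := by
    have h1 : mn ≤ ss.getD 0 0 := hmnmin _ hhead_mem
    obtain ⟨k, hk, hkx⟩ := List.mem_iff_getElem.mp (hperm.mem_iff.mpr hmnmem)
    have h2 : ss.getD 0 0 ≤ mn := by
      rw [← hkx, ← List.getD_eq_getElem ss 0 hk]
      exact pv_mono_le ss hpair 0 k (by omega) (by omega)
    omega
  rw [hmx, hmn]
  simp only [Option.getD_some, pv_len_ofList_eq_iff_nodup, PySem.List.len_eq, hmx_eq, hmn_eq]
  have hcast : ((ss.length - 1 : Nat) : Int) = (ns.length : Int) - 1 := by omega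
  constructor
  · -- steps of 1 ⇒ distinct + span
    intro hP
    have hclosed := pv_steps_closed ss hP
    have hlt : ss.Pairwise (· < ·) := by
      rw [List.pairwise_iff_getElem]
      intro i j hi hj hij
      rw [← List.getD_eq_getElem ss 0 hi, ← List.getD_eq_getElem ss 0 hj,
          hclosed i (by omega), hclosed j (by omega)]
      omega
    refine ⟨hperm.nodup_iff.mp (hlt.imp (fun h => ne_of_lt h)), ?_⟩
    rw [hclosed (ss.length - 1) (by omega), hclosed 0 (by omega)]
    omega
  · -- distinct + span ⇒ steps of 1
    rintro ⟨hnd, hspan⟩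
    have hssnd : ss.Nodup := hperm.nodup_iff.mpr hnd
    have hlt : ss.Pairwise (· < ·) :=
      (hpair.and hssnd).imp (fun h => lt_of_le_of_ne h.1 h.2)
    intro k hk
    have g1 := pv_mono_gap ss hlt 0 k (by omega) (by omega)
    have g2 := pv_mono_gap ss hlt k (k+1) (by omega) (by omega)
    have g3 := pv_mono_gap ss hlt (k+1) (ss.length - 1) (by omega) (by omega)
    have hc1 : ((ss.length - 1 : Nat) : Int) = (ss.length : Int) - 1 := by omega
    rw [hc1] at g3
    push_cast at g1 g2 g3
    omega

-- ===== VERDICT (by name: the statement is the Claim_ definition above) =====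
theorem score_sequence_spec : Claim_equal_score_sequence := by
  intro cards _
  show score_sequence cards = score_sequence_alt cards
  simp only [score_sequence, score_sequence_alt]
  by_cases h : PySem.List.len cards < 3
  · rw [if_pos h, if_pos h]
  · rw [if_neg h, if_neg h]
    have h3 : 3 ≤ (cards.map (fun card => card.1)).length := by
      simp only [PySem.List.len_eq] at h
      simp only [List.length_map]
      omega
    have key := pv_main (cards.map (fun card => card.1)) h3
    split_ifs with h1 h2 h2
    · simp [PySem.List.len_eq]
    · exact absurd (key.mp h1) h2
    · exact absurd (key.mpr h2) h1
    · rfl
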